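-- pv_equiv track=rewrite | github.com/fortjer/2022-advent-of-code | day9.py | visualize_2D_bridge
-- ===== SOURCE A (Python) =====
-- INDEX_X_COORD = 0
--
-- INDEX_Y_COORD = 1
--
-- def visualize_2D_bridge(tail_coords):
--     max_x_coord = 0
--     max_y_coord = 0
--     visualization = []
--     curr_row = []
--
--     for entry in tail_coords:
--         if entry[INDEX_X_COORD] > max_x_coord:
--             max_x_coord = entry[INDEX_X_COORD]
--
--         if entry[INDEX_Y_COORD] > max_y_coord:
--             max_y_coord = entry[INDEX_Y_COORD]
--
--     for y_coord in range(0, max_y_coord + 2):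
--         for x_coord in range(0, max_x_coord + 2):
--             curr_coords = (x_coord, y_coord)
--
--             if curr_coords in tail_coords:
--                 curr_row.append('#')
--             else:
--                 curr_row.append('.')
--
--         visualization.append(curr_row)
--         curr_row = []
--
--     return visualization
-- ===== SOURCE B (Python) =====
-- def visualize_2D_bridge(tail_coords):
--     max_x_coord = 0
--     max_y_coord = 0
--     for entry in tail_coords:
--         if entry[0] > max_x_coord:
--             max_x_coord = entry[0]
--         if entry[1] > max_y_coord:
--             max_y_coord = entry[1]
--
--     height = max_y_coord + 2
--     width = max_x_coord + 2
--     grid = [['.'] * width for _ in range(height)]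
--
--     for entry in tail_coords:
--         x, y = entry[0], entry[1]
--         if 0 <= x < width and 0 <= y < height:
--             grid[y][x] = '#'
--
--     return grid
-- ===== Notes on version B (the rewrite author's own statement) =====
-- stated objective: faster
-- what changed: Replaces the per-cell membership scan over tail_coords with a blank '.' canvas built once and a single scatter pass that writes '#' at each in-bounds coordinate, so the inner 'in tail_coords' scan disappears.
import Mathlib
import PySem

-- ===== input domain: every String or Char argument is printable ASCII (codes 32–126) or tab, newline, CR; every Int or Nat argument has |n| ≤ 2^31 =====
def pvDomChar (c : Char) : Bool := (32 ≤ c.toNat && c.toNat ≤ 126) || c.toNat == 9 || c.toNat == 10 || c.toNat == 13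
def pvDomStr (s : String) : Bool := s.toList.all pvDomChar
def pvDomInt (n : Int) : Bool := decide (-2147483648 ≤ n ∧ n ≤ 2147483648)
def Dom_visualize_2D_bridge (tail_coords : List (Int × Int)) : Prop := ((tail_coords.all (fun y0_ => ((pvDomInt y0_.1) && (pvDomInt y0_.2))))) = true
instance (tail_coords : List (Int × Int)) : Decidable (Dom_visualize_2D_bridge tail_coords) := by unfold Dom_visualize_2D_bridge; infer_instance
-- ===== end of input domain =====

-- B replaces A's per-cell membership scan by scattering '#' marks onto a blank '.' canvas in one pass over the points (objective: faster).

-- ===== PORT A =====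
-- first loop of A: running maxima starting from (0, 0)
def vizMaxA (tail_coords : List (Int × Int)) : Int × Int :=
  tail_coords.foldl (fun m e =>
    (if e.1 > m.1 then e.1 else m.1, if e.2 > m.2 then e.2 else m.2)) (0, 0)

def visualize_2D_bridge (tail_coords : List (Int × Int)) : List (List String) :=
  let m := vizMaxA tail_coords
  (PySem.List.pyRange 0 (m.2 + 2) 1).foldl (fun vis y =>
    vis ++ [(PySem.List.pyRange 0 (m.1 + 2) 1).foldl (fun row x =>
      row ++ [if (x, y) ∈ tail_coords then "#" else "."]) []]) []

-- ===== PORT B =====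
-- first loop of Source B: same running maxima
def vizMaxB (tail_coords : List (Int × Int)) : Int × Int :=
  tail_coords.foldl (fun m e =>
    (if e.1 > m.1 then e.1 else m.1, if e.2 > m.2 then e.2 else m.2)) (0, 0)

def visualize_2D_bridge_alt (tail_coords : List (Int × Int)) : List (List String) :=
  let m := vizMaxB tail_coords
  let height := m.2 + 2
  let width := m.1 + 2
  let grid := List.replicate height.toNat (List.replicate width.toNat ".")
  tail_coords.foldl (fun g e =>
    if 0 ≤ e.1 ∧ e.1 < width ∧ 0 ≤ e.2 ∧ e.2 < height then
      g.set e.2.toNat ((g.getD e.2.toNat []).set e.1.toNat "#")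
    else g) grid

-- ===== PRECONDITION & SPEC =====
def Spec_visualize_2D_bridge (tail_coords : List (Int × Int)) (out : List (List String)) : Prop := out = visualize_2D_bridge_alt tail_coords
instance (tail_coords : List (Int × Int)) (out : List (List String)) : Decidable (Spec_visualize_2D_bridge tail_coords out) := by unfold Spec_visualize_2D_bridge; infer_instance

-- ===== CLAIM (what is proved, stated in full; the proofs are below) =====
def Claim_equal_visualize_2D_bridge : Prop := ∀ (tail_coords : List (Int × Int)), Dom_visualize_2D_bridge tail_coords → Spec_visualize_2D_bridge tail_coords (visualize_2D_bridge tail_coords)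

-- ===== LEMMAS AND PROOFS =====

theorem vizMax_fold_le (tc : List (Int × Int)) :
    ∀ m : Int × Int,
      m.1 ≤ (tc.foldl (fun m e =>
        (if e.1 > m.1 then e.1 else m.1, if e.2 > m.2 then e.2 else m.2)) m).1 ∧
      m.2 ≤ (tc.foldl (fun m e =>
        (if e.1 > m.1 then e.1 else m.1, if e.2 > m.2 then e.2 else m.2)) m).2 := by
  induction tc with
  | nil => intro m; simp
  | cons e tc ih =>
    intro m
    have h := ih (if e.1 > m.1 then e.1 else m.1, if e.2 > m.2 then e.2 else m.2)
    simp only [List.foldl_cons]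
    constructor
    · refine le_trans ?_ h.1; dsimp; split_ifs <;> omega
    · refine le_trans ?_ h.2; dsimp; split_ifs <;> omega

theorem vizMaxA_nonneg (tc : List (Int × Int)) : 0 ≤ (vizMaxA tc).1 ∧ 0 ≤ (vizMaxA tc).2 := by
  have h := vizMax_fold_le tc (0, 0)
  exact ⟨h.1, h.2⟩

-- A in normal form: a map over the index rectangle
theorem portA_norm (tc : List (Int × Int)) :
    visualize_2D_bridge tc =
      (List.range ((vizMaxA tc).2 + 2).toNat).map (fun (j : Nat) =>
        (List.range ((vizMaxA tc).1 + 2).toNat).map (fun (i : Nat) =>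
          if ((i : Int), (j : Int)) ∈ tc then "#" else ".")) := by
  simp only [visualize_2D_bridge, PySem.List.foldl_append_singleton_eq_map,
    PySem.List.pyRange_one, List.map_map, List.nil_append, Int.sub_zero,
    Int.zero_add]
  rfl

-- scatter invariant: after scattering tc onto a rectangular H×W grid, cell (i, j)
-- is "#" exactly when (i, j) ∈ tc, and otherwise keeps the grid's old value
theorem scatter_char (W H : Int) (hW : 0 ≤ W) (hH : 0 ≤ H) :
    ∀ (tc : List (Int × Int)) (g : List (List String)),
    g.length = H.toNat → (∀ r ∈ g, r.length = W.toNat) →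
    ((tc.foldl (fun g e =>
        if 0 ≤ e.1 ∧ e.1 < W ∧ 0 ≤ e.2 ∧ e.2 < H then
          g.set e.2.toNat ((g.getD e.2.toNat []).set e.1.toNat "#")
        else g) g).length = H.toNat ∧
    (∀ r ∈ (tc.foldl (fun g e =>
        if 0 ≤ e.1 ∧ e.1 < W ∧ 0 ≤ e.2 ∧ e.2 < H then
          g.set e.2.toNat ((g.getD e.2.toNat []).set e.1.toNat "#")
        else g) g), r.length = W.toNat) ∧
    (∀ j i, j < H.toNat → i < W.toNat →
      (((tc.foldl (fun g e =>
        if 0 ≤ e.1 ∧ e.1 < W ∧ 0 ≤ e.2 ∧ e.2 < H then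
          g.set e.2.toNat ((g.getD e.2.toNat []).set e.1.toNat "#")
        else g) g).getD j []).getD i "") =
        if ((i : Int), (j : Int)) ∈ tc then "#" else ((g.getD j []).getD i ""))) := by
  intro tc
  induction tc with
  | nil => intro g hg hr; simpa using ⟨hg, hr⟩
  | cons e tc ih =>
    intro g hg hr
    simp only [List.foldl_cons]
    by_cases hcond : 0 ≤ e.1 ∧ e.1 < W ∧ 0 ≤ e.2 ∧ e.2 < H
    · -- in-bounds: the grid is updated at (e.1, e.2)
      have hylt : e.2.toNat < g.length := by rw [hg]; omega
      have hrowlen : (g.getD e.2.toNat []).length = W.toNat := by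
        rw [List.getD_eq_getElem g [] hylt]
        exact hr _ (List.getElem_mem hylt)
      rw [if_pos hcond]
      set g2 := g.set e.2.toNat ((g.getD e.2.toNat []).set e.1.toNat "#") with hg2
      have hlen2 : g2.length = H.toNat := by rw [hg2, List.length_set, hg]
      have hrow2 : ∀ r ∈ g2, r.length = W.toNat := by
        intro r hrm
        rcases List.mem_or_eq_of_mem_set hrm with h | h
        · exact hr r h
        · rw [h, List.length_set]; exact hrowlen
      obtain ⟨L, R, E⟩ := ih g2 hlen2 hrow2
      refine ⟨L, R, ?_⟩
      intro j i hj hi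
      rw [E j i hj hi]
      have key : (g2.getD j []).getD i "" =
          if ((i : Int), (j : Int)) = e then "#" else (g.getD j []).getD i "" := by
        by_cases hjy : j = e.2.toNat
        · subst hjy
          have hrow : g2.getD e.2.toNat [] = (g.getD e.2.toNat []).set e.1.toNat "#" := by
            rw [hg2]; simp [List.getD_eq_getElem?_getD, hylt]
          rw [hrow]
          by_cases hix : i = e.1.toNat
          · subst hix
            have hilen : e.1.toNat < (g.getD e.2.toNat []).length := by
              rw [hrowlen]; omega
            have hpe : ((e.1.toNat : Int), (e.2.toNat : Int)) = e := by
              rw [Prod.ext_iff]; constructor <;> [simp; simp] <;> omega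
            rw [if_pos hpe,
              List.getD_eq_getElem _ "" (by rw [List.length_set]; exact hilen)]
            simp
          · have hne : ¬ ((i : Int), ((e.2.toNat : Nat) : Int)) = e := by
              rw [Prod.ext_iff]; intro h; exact hix (by omega)
            rw [if_neg hne]
            simp [List.getD_eq_getElem?_getD,
              List.getElem?_set_ne (show e.1.toNat ≠ i by omega)]
        · have hne : ¬ ((i : Int), (j : Int)) = e := by
            rw [Prod.ext_iff]; intro h; exact hjy (by omega)
          rw [if_neg hne, hg2]
          simp [List.getD_eq_getElem?_getD,
            List.getElem?_set_ne (show e.2.toNat ≠ j by omega)]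
      rw [key]
      by_cases hm : ((i : Int), (j : Int)) ∈ tc
      · simp [hm, List.mem_cons]
      · by_cases he : ((i : Int), (j : Int)) = e <;> simp [hm, he, List.mem_cons]
    · -- out of bounds: the grid is unchanged and (i, j) cannot equal e
      rw [if_neg hcond]
      obtain ⟨L, R, E⟩ := ih g hg hr
      refine ⟨L, R, ?_⟩
      intro j i hj hi
      rw [E j i hj hi]
      have hne : ¬ ((i : Int), (j : Int)) = e := by
        obtain ⟨x, y⟩ := e
        simp only [Prod.mk.injEq, not_and]
        intro h1 h2
        exact hcond (by constructor <;> [omega; (constructor <;> [omega; (constructor <;> omega)])])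
      by_cases hm : ((i : Int), (j : Int)) ∈ tc
      · simp [hm, List.mem_cons]
      · simp [hm, hne, List.mem_cons]

theorem portB_norm (tc : List (Int × Int)) :
    visualize_2D_bridge_alt tc =
      (List.range ((vizMaxA tc).2 + 2).toNat).map (fun (j : Nat) =>
        (List.range ((vizMaxA tc).1 + 2).toNat).map (fun (i : Nat) =>
          if ((i : Int), (j : Int)) ∈ tc then "#" else ".")) := by
  obtain ⟨hx, hy⟩ := vizMaxA_nonneg tc
  have hW : 0 ≤ (vizMaxA tc).1 + 2 := by omega
  have hH : 0 ≤ (vizMaxA tc).2 + 2 := by omega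
  obtain ⟨L, R, E⟩ := scatter_char ((vizMaxA tc).1 + 2) ((vizMaxA tc).2 + 2) hW hH tc
    (List.replicate ((vizMaxA tc).2 + 2).toNat
      (List.replicate ((vizMaxA tc).1 + 2).toNat "."))
    (by simp) (by intro r hrm; rw [List.eq_of_mem_replicate hrm]; simp)
  have hB : visualize_2D_bridge_alt tc = tc.foldl (fun g e =>
      if 0 ≤ e.1 ∧ e.1 < (vizMaxA tc).1 + 2 ∧ 0 ≤ e.2 ∧ e.2 < (vizMaxA tc).2 + 2 then
        g.set e.2.toNat ((g.getD e.2.toNat []).set e.1.toNat "#")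
      else g)
      (List.replicate ((vizMaxA tc).2 + 2).toNat
        (List.replicate ((vizMaxA tc).1 + 2).toNat ".")) := rfl
  rw [hB]
  apply List.ext_getElem
  · rw [L]; simp
  · intro j h1 h2
    have hj : j < ((vizMaxA tc).2 + 2).toNat := by rwa [L] at h1
    apply List.ext_getElem
    · rw [R _ (List.getElem_mem h1)]; simp
    · intro i h3 h4
      have hi : i < ((vizMaxA tc).1 + 2).toNat := by
        rw [R _ (List.getElem_mem h1)] at h3; exact h3
      have hE := E j i hj hi
      have hblank : ((List.replicate ((vizMaxA tc).2 + 2).toNat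
          (List.replicate ((vizMaxA tc).1 + 2).toNat ".")).getD j []).getD i "" = "." := by
        rw [List.getD_eq_getElem _ [] (by simpa using hj), List.getElem_replicate,
          List.getD_eq_getElem _ "" (by simpa using hi), List.getElem_replicate]
      rw [List.getD_eq_getElem _ [] h1, List.getD_eq_getElem _ "" h3, hblank] at hE
      simp only [List.getElem_map, List.getElem_range]
      exact hE

-- ===== VERDICT (by name: the statement is the Claim_ definition above) =====
theorem visualize_2D_bridge_spec : Claim_equal_visualize_2D_bridge := by
  intro tc _
  unfold Spec_visualize_2D_bridge
  rw [portA_norm, portB_norm]
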